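-- pv_equiv track=rewrite | github.com/GrissonWu07/agents-stock | app/batch_deep_analysis.py | normalize_stock_code
-- ===== SOURCE A (Python) =====
-- from typing import Any, Callable
--
-- def normalize_stock_code(stock_code: Any) -> str:
--     """Normalize selector output like 600000.SH -> 600000."""
--     if stock_code is None:
--         return ""
--
--     normalized = str(stock_code).strip().upper()
--     if not normalized:
--         return ""
--
--     for delimiter in (".", " "):
--         if delimiter in normalized:
--             normalized = normalized.split(delimiter)[0]
--     return normalized
-- ===== SOURCE B (Python) =====
-- def normalize_stock_code(stock_code):
--     """Normalize selector output like 600000.SH -> 600000."""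
--     if stock_code is None:
--         return ""
--     out = []
--     for ch in str(stock_code).strip().upper():
--         if ch in ". ":
--             break
--         out.append(ch)
--     return "".join(out)
-- ===== Notes on version B (the rewrite author's own statement) =====
-- stated objective: alternative
-- what changed: Replaces A's staged delimiter passes (membership test then split-and-reassign per delimiter) with one character-by-character scan that accumulates characters and breaks at the first '.' or ' ', never calling split or find.
import Mathlib
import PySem

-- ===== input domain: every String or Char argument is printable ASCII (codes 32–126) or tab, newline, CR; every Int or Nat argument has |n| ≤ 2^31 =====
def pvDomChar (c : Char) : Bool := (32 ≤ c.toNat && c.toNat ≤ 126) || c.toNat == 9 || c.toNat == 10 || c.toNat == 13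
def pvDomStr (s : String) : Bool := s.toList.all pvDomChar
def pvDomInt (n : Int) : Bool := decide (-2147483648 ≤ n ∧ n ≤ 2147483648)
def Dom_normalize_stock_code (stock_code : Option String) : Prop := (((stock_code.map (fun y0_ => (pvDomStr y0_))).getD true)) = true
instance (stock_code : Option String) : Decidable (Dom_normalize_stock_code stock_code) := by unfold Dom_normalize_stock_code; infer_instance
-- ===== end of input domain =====

-- B replaces A's staged delimiter passes (membership test + split-and-reassign per delimiter)
-- with a single character scan that accumulates output and stops at the first '.' or ' ';
-- objective: alternative (same cost, different traversal).


-- ===== PORT A =====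
def normalize_stock_code (stock_code : Option String) : String :=
  match stock_code with
  | none => ""
  | some s =>
    let normalized := PySem.Str.upper (PySem.Str.strip s)
    if PySem.Str.len normalized = 0 then ""
    else
      -- for delimiter in (".", " "): if delimiter in normalized: normalized = normalized.split(delimiter)[0]
      -- split with a nonempty separator always returns a nonempty list, so [0] is its head
      [".", " "].foldl
        (fun n d =>
          if PySem.Str.isIn d n then ((PySem.Str.split? n d).getD []).headD "" else n)
        normalized

-- ===== PORT B =====
-- the for-loop with break: out accumulates characters until a delimiter is met
def pvScan (l : List Char) (out : List Char) : List Char :=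
  match l with
  | [] => out
  | c :: rest => if (". ".toList).contains c then out else pvScan rest (out ++ [c])

def normalize_stock_code_alt (stock_code : Option String) : String :=
  match stock_code with
  | none => ""
  | some s =>
    -- "".join(out) over single characters is String.mk of the accumulated list
    String.mk (pvScan (PySem.Str.upper (PySem.Str.strip s)).toList [])

-- ===== PRECONDITION & SPEC =====
def Spec_normalize_stock_code (stock_code : Option String) (out : String) : Prop := out = normalize_stock_code_alt stock_code
instance (stock_code : Option String) (out : String) : Decidable (Spec_normalize_stock_code stock_code out) := by unfold Spec_normalize_stock_code; infer_instance

-- ===== CLAIM (what is proved, stated in full; the proofs are below) =====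
def Claim_equal_normalize_stock_code : Prop := ∀ (stock_code : Option String), Dom_normalize_stock_code stock_code → Spec_normalize_stock_code stock_code (normalize_stock_code stock_code)

-- ===== LEMMAS AND PROOFS =====

theorem lem_singleton_infix (c : Char) (l : List Char) : [c] <:+: l ↔ c ∈ l := by
  constructor
  · intro h; exact List.singleton_sublist.mp h.sublist
  · intro h
    obtain ⟨u, v, huv⟩ := List.append_of_mem h
    exact ⟨u, v, by simp [huv]⟩

theorem lem_go_acc (c : Char) :
    ∀ (fuel : Nat) (l cur : List Char) (acc : List (List Char)),
      PySem.Chars.splitOn.go [c] fuel l cur acc =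
        acc.reverse ++ PySem.Chars.splitOn.go [c] fuel l cur [] := by
  intro fuel
  induction fuel with
  | zero => intro l cur acc; cases l <;> simp [PySem.Chars.splitOn.go]
  | succ fuel ih =>
    intro l cur acc
    cases l with
    | nil => simp [PySem.Chars.splitOn.go]
    | cons a rest =>
      rw [PySem.Chars.splitOn.go.eq_def]
      conv_rhs => rw [PySem.Chars.splitOn.go.eq_def]
      by_cases hp : List.isPrefixOf [c] (a :: rest)
      · simp only [hp, if_true]
        rw [ih _ _ (cur.reverse :: acc), ih _ _ [cur.reverse]]
        simp
      · simp only [hp]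
        exact ih _ _ acc

theorem lem_go_head (c : Char) :
    ∀ (fuel : Nat) (l cur : List Char), l.length ≤ fuel →
      (PySem.Chars.splitOn.go [c] fuel l cur []).headD [] =
        cur.reverse ++ l.takeWhile (· != c) := by
  intro fuel
  induction fuel with
  | zero =>
    intro l cur hl
    have : l = [] := by cases l <;> simp_all
    subst this; simp [PySem.Chars.splitOn.go]
  | succ fuel ih =>
    intro l cur hl
    cases l with
    | nil => simp [PySem.Chars.splitOn.go]
    | cons a rest =>
      rw [PySem.Chars.splitOn.go.eq_def]
      by_cases hac : a = c
      · have hp : List.isPrefixOf [c] (a :: rest) = true := by simp [hac]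
        simp only [hp, if_true]
        rw [lem_go_acc]
        simp [List.takeWhile, hac]
      · have hp : List.isPrefixOf [c] (a :: rest) = false := by simp [List.isPrefixOf]; exact fun h => hac h.symm
        simp only [hp, Bool.false_eq_true, if_false]
        rw [ih rest (a :: cur) (by simpa using Nat.le_of_succ_le_succ hl)]
        have hb : (a != c) = true := by simp [hac]
        simp [List.takeWhile, hb]

theorem lem_splitOn_head (c : Char) (t : List Char) :
    (PySem.Chars.splitOn t [c]).headD [] = t.takeWhile (· != c) := by
  unfold PySem.Chars.splitOn
  simpa using lem_go_head c (t.length + 1) t [] (by omega)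

theorem lem_step (n d : String) (c : Char) (hd : d.toList = [c]) :
    (if PySem.Str.isIn d n then ((PySem.Str.split? n d).getD []).headD "" else n).toList =
      n.toList.takeWhile (· != c) := by
  by_cases h : PySem.Str.isIn d n = true
  · simp only [h, if_true]
    have hmap := PySem.Str.split?_map n d
    have hsplit : PySem.Chars.split? n.toList d.toList = some (PySem.Chars.splitOn n.toList [c]) := by
      simp [PySem.Chars.split?, hd]
    rw [hsplit] at hmap
    cases hs : PySem.Str.split? n d with
    | none => rw [hs] at hmap; simp at hmap
    | some l =>
      rw [hs] at hmap
      simp only [Option.map_some, Option.some.injEq] at hmap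
      have hdm : (l.headD "").toList = (l.map String.toList).headD "".toList := by
        rw [List.headD_map]
      simp only [Option.getD_some]
      rw [hdm, hmap]
      simpa using lem_splitOn_head c n.toList
  · simp only [h, Bool.false_eq_true, if_false]
    have hninf : ¬ [c] <:+: n.toList := by
      have := (PySem.Str.isIn_eq d n) ▸ h
      rw [hd] at this
      exact (PySem.Chars.isIn_eq_false_iff [c] n.toList).mp (Bool.not_eq_true _ ▸ eq_false_of_ne_true this)
    have hcm : c ∉ n.toList := fun hm => hninf ((lem_singleton_infix c n.toList).mpr hm)
    exact (List.takeWhile_eq_self_iff.mpr (fun a ha => by simp; exact fun he => hcm (he ▸ ha))).symm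

theorem lem_congr_takeWhile (p q : Char → Bool) (l : List Char) (h : ∀ a ∈ l, p a = q a) :
    l.takeWhile p = l.takeWhile q := by
  induction l with
  | nil => rfl
  | cons a l ih =>
    have ha := h a (by simp)
    simp only [List.takeWhile, ha]
    cases q a
    · rfl
    · simp [ih (fun b hb => h b (by simp [hb]))]

theorem lem_A (n : String) :
    (([".", " "] : List String).foldl
        (fun n d => if PySem.Str.isIn d n then ((PySem.Str.split? n d).getD []).headD "" else n)
        n).toList = n.toList.takeWhile (fun c => (c != '.') && (c != ' ')) := by
  simp only [List.foldl]
  rw [lem_step _ " " ' ' rfl, lem_step _ "." '.' rfl]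
  rw [List.takeWhile_takeWhile]
  exact lem_congr_takeWhile _ _ n.toList (fun a _ => by
    by_cases h1 : a = '.' <;> by_cases h2 : a = ' ' <;> simp [h1, h2])

theorem lem_scan (l : List Char) :
    ∀ out, pvScan l out = out ++ l.takeWhile (fun c => (c != '.') && (c != ' ')) := by
  induction l with
  | nil => intro out; simp [pvScan]
  | cons a rest ih =>
    intro out
    have hmem : (". ".toList).contains a = !((a != '.') && (a != ' ')) := by
      by_cases h1 : a = '.' <;> by_cases h2 : a = ' ' <;> simp [h1, h2] <;> decide
    rw [pvScan, hmem]
    by_cases hp : ((a != '.') && (a != ' ')) = true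
    · simp only [hp, Bool.not_true, Bool.false_eq_true, if_false]
      rw [ih (out ++ [a])]
      simp [List.takeWhile, hp]
    · have hp' : ((a != '.') && (a != ' ')) = false := by simpa using hp
      simp [hp', List.takeWhile]

-- ===== VERDICT (by name: the statement is the Claim_ definition above) =====
theorem normalize_stock_code_spec : Claim_equal_normalize_stock_code := by
  unfold Claim_equal_normalize_stock_code
  intro sc _
  unfold Spec_normalize_stock_code normalize_stock_code normalize_stock_code_alt
  cases sc with
  | none => rfl
  | some s =>
    simp only
    generalize PySem.Str.upper (PySem.Str.strip s) = n
    rw [lem_scan n.toList []]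
    by_cases h0 : PySem.Str.len n = 0
    · have htn : n.toList = [] := by
        have h := PySem.Str.len_eq n
        rw [h0] at h
        have : n.toList.length = 0 := by exact_mod_cast h.symm
        exact List.length_eq_zero_iff.mp this
      simp only [h0, if_true, htn, List.takeWhile_nil, List.nil_append]
      decide
    · simp only [h0, if_false, List.nil_append]
      apply String.toList_injective
      rw [lem_A]
      exact String.ofList_eq.mp rfl
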